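-- pv_equiv track=rewrite | github.com/richabhowmik03/Smart-Resume | utils.py | get_section_indices
-- ===== SOURCE A (Python) =====
-- def get_section_indices(lines, section):
--     """Find start and end indices for a LaTeX section."""
--     start = None
--     end = None
--     for idx, line in enumerate(lines):
--         if line.strip().startswith(r"\section") and section in line:
--             start = idx
--             break
--     if start is not None:
--         # End at next \section or \end{document}
--         for idx2 in range(start+1, len(lines)):
--             if lines[idx2].strip().startswith(r"\section") or lines[idx2].strip() == r"\end{document}":
--                 end = idx2
--                 break
--         if end is None:
--             end = len(lines)
--     return start, end
-- ===== SOURCE B (Python) =====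
-- def get_section_indices(lines, section):
--     """Find start and end indices for a LaTeX section.
--
--     Single pass: collect all boundary indices (any \section line or the
--     \end{document} line) and the start index at once; the end index is then
--     a lookup of the first boundary past the start, no second scan of lines.
--     """
--     boundaries = []
--     start = None
--     for idx, line in enumerate(lines):
--         stripped = line.strip()
--         is_sec = stripped.startswith(r"\section")
--         if is_sec or stripped == r"\end{document}":
--             boundaries.append(idx)
--         if start is None and is_sec and section in line:
--             start = idx
--     if start is None:
--         return None, None
--     end = next((b for b in boundaries if b > start), len(lines))
--     return start, end
-- ===== Notes on version B (the rewrite author's own statement) =====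
-- stated objective: alternative
-- what changed: One pass over enumerate(lines) collects all boundary indices and the start index simultaneously; the end index is then found by a lookup into the prebuilt boundary table instead of A's second scan over range(start+1, len(lines)).
import Mathlib
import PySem

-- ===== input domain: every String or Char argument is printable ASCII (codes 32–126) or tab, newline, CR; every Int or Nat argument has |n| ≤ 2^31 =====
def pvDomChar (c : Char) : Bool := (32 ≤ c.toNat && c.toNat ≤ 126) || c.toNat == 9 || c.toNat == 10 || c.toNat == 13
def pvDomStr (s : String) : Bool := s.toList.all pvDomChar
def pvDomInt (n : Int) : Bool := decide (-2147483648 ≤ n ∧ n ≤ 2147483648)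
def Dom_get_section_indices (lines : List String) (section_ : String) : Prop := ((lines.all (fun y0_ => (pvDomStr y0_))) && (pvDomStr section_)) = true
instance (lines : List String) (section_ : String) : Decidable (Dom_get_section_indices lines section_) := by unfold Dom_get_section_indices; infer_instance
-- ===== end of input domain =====

-- B replaces A's second scan over range(start+1, len(lines)) by one pass that also
-- collects the boundary indices, the end then being a lookup in that table ("alternative").

-- ===== PORT A =====
-- first loop: 'for idx, line in enumerate(lines): if … : start = idx; break'
def pvAFindStart (section_ : String) : List (Int × String) → Option Int
  | [] => none
  | (idx, line) :: rest =>
    if PySem.Str.startswith (PySem.Str.strip line) "\\section" && PySem.Str.isIn section_ line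
    then some idx else pvAFindStart section_ rest

-- second loop: 'for idx2 in range(start+1, len(lines)): if … : end = idx2; break'
-- (lines[idx2]: idx2 always lies in range, so pyGetD with default "" is exact here)
def pvAFindEnd (lines : List String) : List Int → Option Int
  | [] => none
  | idx2 :: rest =>
    if PySem.Str.startswith (PySem.Str.strip (PySem.List.pyGetD lines idx2 "")) "\\section"
       || PySem.Str.strip (PySem.List.pyGetD lines idx2 "") == "\\end{document}"
    then some idx2 else pvAFindEnd lines rest

def get_section_indices (lines : List String) (section_ : String) : Option Int × Option Int :=
  match pvAFindStart section_ (PySem.List.enumerate lines) with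
  | none => (none, none)
  | some start =>
    let e := pvAFindEnd lines (PySem.List.pyRange (start + 1) lines.length 1)
    (some start, some (e.getD lines.length))

-- ===== PORT B =====
-- one fold over enumerate(lines) carrying (boundaries, start)
def pvBStep (section_ : String) (st : List Int × Option Int) (p : Int × String) : List Int × Option Int :=
  let stripped := PySem.Str.strip p.2
  let isSec := PySem.Str.startswith stripped "\\section"
  let bnds := if isSec || stripped == "\\end{document}" then st.1 ++ [p.1] else st.1
  let start := if st.2.isNone && isSec && PySem.Str.isIn section_ p.2 then some p.1 else st.2
  (bnds, start)

def get_section_indices_alt (lines : List String) (section_ : String) : Option Int × Option Int :=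
  let scan := (PySem.List.enumerate lines).foldl (pvBStep section_) ([], none)
  match scan.2 with
  | none => (none, none)
  | some start =>
    -- end = next((b for b in boundaries if b > start), len(lines))
    (some start, some ((scan.1.find? (fun b => decide (start < b))).getD lines.length))

-- ===== PRECONDITION & SPEC =====
def Spec_get_section_indices (lines : List String) (section_ : String) (out : Option Int × Option Int) : Prop := out = get_section_indices_alt lines section_
instance (lines : List String) (section_ : String) (out : Option Int × Option Int) : Decidable (Spec_get_section_indices lines section_ out) := by unfold Spec_get_section_indices; infer_instance

-- ===== CLAIM (what is proved, stated in full; the proofs are below) =====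
def Claim_equal_get_section_indices : Prop := ∀ (lines : List String) (section_ : String), Dom_get_section_indices lines section_ → Spec_get_section_indices lines section_ (get_section_indices lines section_)

-- ===== LEMMAS AND PROOFS =====

-- the boundary predicate both programs test, as a named helper for the proofs
def pvIsBnd (line : String) : Bool :=
  PySem.Str.startswith (PySem.Str.strip line) "\\section"
    || PySem.Str.strip line == "\\end{document}"

-- a found start is never forgotten by the fold
lemma pvFoldl_some (section_ : String) (L : List (Int × String)) :
    ∀ b0 x, (L.foldl (pvBStep section_) (b0, some x)).2 = some x := by
  induction L with
  | nil => intro b0 x; rfl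
  | cons p rest ih =>
    intro b0 x
    rw [List.foldl_cons,
      show pvBStep section_ (b0, some x) p
        = ((pvBStep section_ (b0, some x) p).1, some x) from by simp [pvBStep]]
    exact ih _ x

-- the fold's start component is A's first loop
lemma pvFoldl_start (section_ : String) (L : List (Int × String)) :
    ∀ b0, (L.foldl (pvBStep section_) (b0, none)).2 = pvAFindStart section_ L := by
  induction L with
  | nil => intro b0; rfl
  | cons p rest ih =>
    intro b0
    obtain ⟨i, l⟩ := p
    cases h1 : PySem.Str.startswith (PySem.Str.strip l) "\\section" <;>
      cases h2 : PySem.Str.isIn section_ l <;>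
        (simp only [List.foldl_cons, pvBStep, pvAFindStart]; simp_all [pvFoldl_some])

-- the fold's first component collects exactly the boundary indices
lemma pvFoldl_bnds (section_ : String) (L : List (Int × String)) :
    ∀ b0 st0, (L.foldl (pvBStep section_) (b0, st0)).1
      = b0 ++ (L.filter (fun p => pvIsBnd p.2)).map Prod.fst := by
  induction L with
  | nil => intro b0 st0; simp
  | cons p rest ih =>
    intro b0 st0
    by_cases h : pvIsBnd p.2 = true
    · simp only [List.foldl_cons, pvBStep]
      rw [if_pos (by simpa [pvIsBnd] using h)]
      rw [ih]
      simp [List.filter_cons, h]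
    · simp only [List.foldl_cons, pvBStep]
      rw [if_neg (by simpa [pvIsBnd] using h)]
      rw [ih]
      simp [List.filter_cons, h]

-- A's second loop is a find? over the range list
lemma pvAFindEnd_eq_find? (lines : List String) (L : List Int) :
    pvAFindEnd lines L = L.find? (fun i => pvIsBnd (PySem.List.pyGetD lines i "")) := by
  induction L with
  | nil => rfl
  | cons i rest ih =>
    rw [show pvAFindEnd lines (i :: rest)
        = (if pvIsBnd (PySem.List.pyGetD lines i "") then some i else pvAFindEnd lines rest)
      from rfl]
    rw [List.find?_cons]
    cases h : pvIsBnd (PySem.List.pyGetD lines i "") <;> simp [h, ih]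

-- find? through a filter
lemma pvFind?_filter {α : Type} (L : List α) (p q : α → Bool) :
    (L.filter p).find? q = L.find? (fun x => q x && p x) := by
  induction L with
  | nil => rfl
  | cons x rest ih =>
    by_cases hp : p x = true
    · by_cases hq : q x = true
      · simp [List.filter_cons, hp, List.find?_cons, hq]
      · simp [List.filter_cons, hp, List.find?_cons, hq, ih]
    · simp [List.filter_cons, hp, List.find?_cons, ih]

-- a start returned by A's first loop is k plus a valid position
lemma pvAFindStart_bound (section_ : String) :
    ∀ (xs : List String) (k s : Int),
      pvAFindStart section_ (PySem.List.enumerate xs k) = some s →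
      ∃ t : ℕ, s = k + t ∧ t < xs.length := by
  intro xs
  induction xs with
  | nil => intro k s h; simp [PySem.List.enumerate_nil, pvAFindStart] at h
  | cons l rest ih =>
    intro k s h
    rw [PySem.List.enumerate_cons] at h
    by_cases hc : (PySem.Str.startswith (PySem.Str.strip l) "\\section"
        && PySem.Str.isIn section_ l) = true
    · simp only [pvAFindStart, hc, if_true, Option.some.injEq] at h
      exact ⟨0, by omega, by simp⟩
    · simp only [pvAFindStart, hc, if_false, Bool.false_eq_true] at h
      obtain ⟨t, ht, hlt⟩ := ih (k + 1) s h
      exact ⟨t + 1, by push_cast; omega, by simpa using Nat.succ_lt_succ hlt⟩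

-- core lemma, A side: find? over range(a, a+|suf|) indexing pre ++ suf is findIdx? on suf
lemma pvFindA :
    ∀ (suf pre : List String),
      (PySem.List.pyRange (pre.length : Int) ((pre.length + suf.length : ℕ) : Int) 1).find?
          (fun i => pvIsBnd (PySem.List.pyGetD (pre ++ suf) i ""))
        = (suf.findIdx? pvIsBnd).map (fun j => ((pre.length + j : ℕ) : Int)) := by
  intro suf
  induction suf with
  | nil =>
    intro pre
    rw [PySem.List.pyRange_one_eq_nil (by simp)]
    simp
  | cons l suf ih =>
    intro pre
    rw [PySem.List.pyRange_one_cons (by push_cast [List.length_cons]; omega)]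
    rw [List.find?_cons]
    have hget : PySem.List.pyGetD (pre ++ l :: suf) (pre.length : Int) "" = l := by
      rw [PySem.List.pyGetD_natCast]
      simp [List.getD_eq_getElem?_getD, List.getElem?_append_right (le_refl pre.length)]
    rw [hget]
    cases h : pvIsBnd l with
    | true => simp [h, List.findIdx?_cons]
    | false =>
      simp only [h]
      have hcast : ((pre.length : Int) + 1) = (((pre ++ [l]).length : ℕ) : Int) := by
        push_cast; simp
      have hlen : (((pre.length + (l :: suf).length : ℕ)) : Int)
          = (((pre ++ [l]).length + suf.length : ℕ) : Int) := by
        push_cast [List.length_cons]; simp; omega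
      rw [hcast, hlen, List.append_cons pre l suf, ih (pre ++ [l])]
      simp only [List.findIdx?_cons, h]
      cases hfi : suf.findIdx? pvIsBnd with
      | none => simp [hfi]
      | some j =>
        simp only [hfi, Option.map_some, Option.map_map, Option.some.injEq,
          Function.comp, Bool.false_eq_true, if_false]
        simp only [List.length_append, List.length_cons, List.length_nil]; push_cast; omega

-- core lemma, B side: find? over enumerate with the "index > t" guard is findIdx? on drop (t+1)
lemma pvFindB :
    ∀ (xs : List String) (k t : ℕ),
      ((PySem.List.enumerate xs (k : Int)).find?
          (fun p => decide ((t : Int) < p.1) && pvIsBnd p.2)).map Prod.fst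
        = ((xs.drop (t + 1 - k)).findIdx? pvIsBnd).map (fun j => ((max k (t + 1) + j : ℕ) : Int)) := by
  intro xs
  induction xs with
  | nil => intro k t; simp [PySem.List.enumerate_nil]
  | cons l rest ih =>
    intro k t
    rw [PySem.List.enumerate_cons, List.find?_cons]
    have hcast : ((k : Int) + 1) = ((k + 1 : ℕ) : Int) := by push_cast; ring
    by_cases hk : t < k
    · have hlt : decide ((t : Int) < ((k : ℕ) : Int)) = true := by
        simp only [decide_eq_true_eq]; exact_mod_cast hk
      have hdrop : t + 1 - k = 0 := by omega
      have hmax : max k (t + 1) = k := by omega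
      cases h : pvIsBnd l with
      | true => simp [hk, h, hdrop, hmax, List.findIdx?_cons]
      | false =>
        simp only [hlt, h, Bool.and_false, Bool.true_and]
        rw [hcast, ih (k + 1) t]
        have hd2 : t + 1 - (k + 1) = 0 := by omega
        have hmax2 : max (k + 1) (t + 1) = k + 1 := by omega
        rw [hdrop, hd2, hmax, hmax2]
        simp only [List.drop_zero, List.findIdx?_cons, h, Bool.false_eq_true, if_false]
        cases hfi : rest.findIdx? pvIsBnd with
        | none => simp [hfi]
        | some j =>
          simp only [hfi, Option.map_some, Option.map_map, Option.some.injEq, Function.comp]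
          push_cast; omega
    · have hlt : decide ((t : Int) < ((k : ℕ) : Int)) = false := by
        simp only [decide_eq_false_iff_not]; push_cast; omega
      simp only [hlt, Bool.false_and]
      rw [hcast, ih (k + 1) t]
      have hd : t + 1 - k = (t + 1 - (k + 1)) + 1 := by omega
      rw [hd]
      simp only [List.drop_succ_cons]
      have hm1 : max k (t + 1) = t + 1 := by omega
      have hm2 : max (k + 1) (t + 1) = t + 1 := by omega
      rw [hm1, hm2]

-- ===== VERDICT (by name: the statement is the Claim_ definition above) =====
theorem get_section_indices_spec : Claim_equal_get_section_indices := by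
  intro lines section_ _
  unfold Spec_get_section_indices
  rw [show get_section_indices lines section_
      = (match pvAFindStart section_ (PySem.List.enumerate lines) with
        | none => ((none : Option Int), (none : Option Int))
        | some start =>
          (some start, some ((pvAFindEnd lines
            (PySem.List.pyRange (start + 1) (lines.length : Int) 1)).getD (lines.length : Int))))
    from rfl]
  rw [show get_section_indices_alt lines section_
      = (match ((PySem.List.enumerate lines).foldl (pvBStep section_) ([], none)).2 with
        | none => ((none : Option Int), (none : Option Int))
        | some start =>
          (some start, some ((((PySem.List.enumerate lines).foldl (pvBStep section_)
            ([], none)).1.find? (fun b => decide (start < b))).getD (lines.length : Int))))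
    from rfl]
  rw [pvFoldl_start section_ _ []]
  cases hs : pvAFindStart section_ (PySem.List.enumerate lines) with
  | none => rfl
  | some s =>
    obtain ⟨t, hts, htlt⟩ := pvAFindStart_bound section_ lines 0 s hs
    have hseq : s = (t : Int) := by omega
    subst hseq
    have hend : pvAFindEnd lines (PySem.List.pyRange ((t : Int) + 1) (lines.length : Int) 1)
        = ((PySem.List.enumerate lines).foldl (pvBStep section_)
            ([], none)).1.find? (fun b => decide ((t : Int) < b)) := by
      -- B side down to findIdx? on lines.drop (t+1)
      rw [pvFoldl_bnds section_ _ [] none, List.nil_append]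
      rw [List.find?_map, pvFind?_filter]
      have hB := pvFindB lines 0 t
      norm_num at hB
      rw [show ((PySem.List.enumerate lines).find? fun x =>
            ((fun b => decide ((t : Int) < b)) ∘ Prod.fst) x
              && (fun p : Int × String => pvIsBnd p.2) x)
          = ((PySem.List.enumerate lines).find? fun p =>
            decide ((t : Int) < p.1) && pvIsBnd p.2) from rfl]
      rw [hB]
      -- A side down to the same findIdx?
      rw [pvAFindEnd_eq_find? lines]
      have hA := pvFindA (lines.drop (t + 1)) (lines.take (t + 1))
      have hpre : (lines.take (t + 1)).length = t + 1 := by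
        simp [List.length_take]; omega
      rw [List.take_append_drop, hpre] at hA
      have hlen : ((t + 1) + (lines.drop (t + 1)).length : ℕ) = lines.length := by
        simp [List.length_drop]; omega
      rw [hlen] at hA
      rw [show ((t : Int) + 1) = (((t + 1 : ℕ)) : Int) from by push_cast; ring, hA]
      exact congrArg (fun f => Option.map f (List.findIdx? pvIsBnd (List.drop (t + 1) lines)))
        (funext fun j => by omega)
    show ((some ((t : ℕ) : Int), some ((pvAFindEnd lines
        (PySem.List.pyRange (((t : ℕ) : Int) + 1) (lines.length : Int) 1)).getD
          (lines.length : Int))) : Option Int × Option Int)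
      = (some ((t : ℕ) : Int), some ((((PySem.List.enumerate lines).foldl (pvBStep section_)
          ([], none)).1.find? (fun b => decide (((t : ℕ) : Int) < b))).getD (lines.length : Int)))
    rw [hend]
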